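-- pv_equiv track=rewrite | github.com/harneet2512/groundtruth | src/groundtruth/ego_graph.py | _join_multiline_imports
-- ===== SOURCE A (Python) =====
-- def _join_multiline_imports(source: str) -> str:
--     """Join multi-line parenthesized imports into single lines.
--
--     Converts: from .base import (\\n  foo, bar,\\n) → from .base import foo, bar
--     Critical for Django-style imports. ~1ms per file.
--     """
--     result: list[str] = []
--     in_paren = False
--     current: list[str] = []
--
--     for line in source.splitlines():
--         stripped = line.strip()
--         if in_paren:
--             if ")" in stripped:
--                 current.append(stripped.replace(")", "").strip().rstrip(","))
--                 result.append(" ".join(current))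
--                 current = []
--                 in_paren = False
--             else:
--                 part = stripped.split("#")[0].strip().rstrip(",").strip()
--                 if part:
--                     current.append(part)
--         elif stripped.startswith(("from ", "import ")) and "(" in stripped and ")" not in stripped:
--             in_paren = True
--             before_paren = stripped.split("(")[0].strip()
--             after_paren = stripped.split("(", 1)[1].strip().rstrip(",").strip()
--             current = [before_paren]
--             if after_paren:
--                 current.append(after_paren)
--         else:
--             result.append(line)
--
--     if current:
--         result.append(" ".join(current))
--     return "\n".join(result)
-- ===== SOURCE B (Python) =====
-- def _join_multiline_imports(source: str) -> str:
--     """Join multi-line parenthesized imports into single lines.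
--
--     Index/while-loop decomposition: when an opening import line is seen, an
--     inner loop consumes the continuation lines up to the closing paren (or to
--     the end of input) and emits one joined line; every other line is emitted
--     unchanged.
--     """
--     lines = source.splitlines()
--     out: list[str] = []
--     i = 0
--     n = len(lines)
--     while i < n:
--         stripped = lines[i].strip()
--         if stripped.startswith(("from ", "import ")) and "(" in stripped and ")" not in stripped:
--             parts = [stripped.split("(")[0].strip()]
--             tail = stripped.split("(", 1)[1].strip().rstrip(",").strip()
--             if tail:
--                 parts.append(tail)
--             i += 1
--             while i < n:
--                 s = lines[i].strip()
--                 i += 1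
--                 if ")" in s:
--                     parts.append(s.replace(")", "").strip().rstrip(","))
--                     break
--                 piece = s.split("#")[0].strip().rstrip(",").strip()
--                 if piece:
--                     parts.append(piece)
--             out.append(" ".join(parts))
--         else:
--             out.append(lines[i])
--             i += 1
--     return "\n".join(out)
-- ===== Notes on version B (the rewrite author's own statement) =====
-- stated objective: alternative
-- what changed: Replaces A's single fold carrying an in_paren flag and a current buffer with an index-style while loop that, on seeing an opening import line, runs an inner loop consuming the block's continuation lines up to the closing paren (or end of input) and emits one joined line.
import Mathlib
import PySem

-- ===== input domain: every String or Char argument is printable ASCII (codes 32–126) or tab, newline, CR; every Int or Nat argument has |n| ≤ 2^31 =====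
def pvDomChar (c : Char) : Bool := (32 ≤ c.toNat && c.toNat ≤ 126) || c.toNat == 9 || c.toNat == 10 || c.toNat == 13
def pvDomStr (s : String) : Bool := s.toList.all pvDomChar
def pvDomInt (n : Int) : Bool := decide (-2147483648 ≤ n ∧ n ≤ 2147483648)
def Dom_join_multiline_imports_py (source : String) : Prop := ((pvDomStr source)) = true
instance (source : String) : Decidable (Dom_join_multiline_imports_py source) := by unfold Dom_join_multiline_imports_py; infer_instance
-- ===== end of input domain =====

-- B re-decomposes A's one-pass state machine (in_paren flag + current buffer) as an
-- index-style while loop with an inner loop consuming each parenthesized block; same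
-- values, different control structure (objective: alternative).

-- ===== PORT A =====
-- s.rstrip(",") ported by hand (exact: drops the trailing run of ',' characters)
def pyRstripComma (s : String) : String :=
  String.ofList ((s.toList.reverse.dropWhile (fun c => c == ',')).reverse)

-- shared per-line expressions (both Pythons contain these literally)
-- stripped.replace(")", "").strip().rstrip(",")
def pvClosePart (s : String) : String :=
  pyRstripComma (PySem.Str.strip (PySem.Str.replace s ")" ""))
-- stripped.split("#")[0].strip().rstrip(",").strip()
def pvContPart (s : String) : String :=
  PySem.Str.strip (pyRstripComma (PySem.Str.strip (((PySem.Str.split? s "#").getD []).getD 0 "")))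
-- stripped.startswith(("from ", "import ")) and "(" in stripped and ")" not in stripped
def pvIsOpener (s : String) : Bool :=
  (PySem.Str.startswith s "from " || PySem.Str.startswith s "import ") &&
    PySem.Str.isIn "(" s && !(PySem.Str.isIn ")" s)
-- [stripped.split("(")[0].strip()] plus stripped.split("(", 1)[1].strip().rstrip(",").strip() if non-empty
def pvOpenParts (s : String) : List String :=
  let before := PySem.Str.strip (((PySem.Str.split? s "(").getD []).getD 0 "")
  let after := PySem.Str.strip (pyRstripComma (PySem.Str.strip
      (((PySem.Str.splitMax? s "(" 1).getD []).getD 1 "")))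
  [before] ++ (if after ≠ "" then [after] else [])

-- one iteration of A's for-loop over (result, in_paren, current)
def stepA (st : List String × Bool × List String) (line : String) :
    List String × Bool × List String :=
  let stripped := PySem.Str.strip line
  if st.2.1 then
    if PySem.Str.isIn ")" stripped then
      (st.1 ++ [PySem.Str.join " " (st.2.2 ++ [pvClosePart stripped])], false, [])
    else
      let part := pvContPart stripped
      if part ≠ "" then (st.1, st.2.1, st.2.2 ++ [part]) else (st.1, st.2.1, st.2.2)
  else if pvIsOpener stripped then
    (st.1, true, pvOpenParts stripped)
  else
    (st.1 ++ [line], st.2.1, st.2.2)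

-- the final 'if current: result.append(" ".join(current))'
def pvFlushA (st : List String × Bool × List String) : List String :=
  if st.2.2 ≠ [] then st.1 ++ [PySem.Str.join " " st.2.2] else st.1

def join_multiline_imports_py (source : String) : String :=
  PySem.Str.join "\n" (pvFlushA ((PySem.Str.splitlines source).foldl stepA ([], false, [])))

-- ===== PORT B =====
-- B's inner while loop: consume continuation lines until a ')' line (or end of input);
-- returns the finished parts list and the remaining lines
def innerB : List String → List String → List String × List String
  | [], parts => (parts, [])
  | l :: rest, parts =>
    let s := PySem.Str.strip l
    if PySem.Str.isIn ")" s then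
      (parts ++ [pvClosePart s], rest)
    else
      let piece := pvContPart s
      innerB rest (parts ++ (if piece ≠ "" then [piece] else []))

theorem innerB_snd_length_le (ls ps : List String) : (innerB ls ps).2.length ≤ ls.length := by
  induction ls generalizing ps with
  | nil => simp [innerB]
  | cons l rest ih =>
    simp only [innerB]
    split
    · simp
    · exact le_trans (ih _) (by simp)

-- B's outer while loop over the list of lines
def loopB : List String → List String
  | [] => []
  | l :: rest =>
    let stripped := PySem.Str.strip l
    if pvIsOpener stripped then
      let pr := innerB rest (pvOpenParts stripped)
      PySem.Str.join " " pr.1 :: loopB pr.2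
    else
      l :: loopB rest
termination_by ls => ls.length
decreasing_by
  · exact Nat.lt_succ_of_le (innerB_snd_length_le rest (pvOpenParts (PySem.Str.strip l)))
  · simp

def join_multiline_imports_py_alt (source : String) : String :=
  PySem.Str.join "\n" (loopB (PySem.Str.splitlines source))

-- ===== PRECONDITION & SPEC =====
def Spec_join_multiline_imports_py (source : String) (out : String) : Prop := out = join_multiline_imports_py_alt source
instance (source : String) (out : String) : Decidable (Spec_join_multiline_imports_py source out) := by unfold Spec_join_multiline_imports_py; infer_instance

-- ===== CLAIM (what is proved, stated in full; the proofs are below) =====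
def Claim_equal_join_multiline_imports_py : Prop := ∀ (source : String), Dom_join_multiline_imports_py source → Spec_join_multiline_imports_py source (join_multiline_imports_py source)

-- ===== LEMMAS AND PROOFS =====

-- innerB's cons-step, written out (definitional)
theorem innerB_cons (l : String) (rest ps : List String) :
    innerB (l :: rest) ps =
      if PySem.Str.isIn ")" (PySem.Str.strip l) = true then
        (ps ++ [pvClosePart (PySem.Str.strip l)], rest)
      else
        innerB rest (ps ++ (if pvContPart (PySem.Str.strip l) ≠ "" then [pvContPart (PySem.Str.strip l)] else [])) := rfl

-- the parts buffer starts non-empty at an opener and innerB only appends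
theorem pvOpenParts_ne_nil (s : String) : pvOpenParts s ≠ [] := by
  simp [pvOpenParts]

-- the joint invariant: A's fold from either state equals B's loops
theorem fold_eq_loop (n : Nat) : ∀ ls : List String, ls.length ≤ n →
    (∀ res : List String,
      pvFlushA (ls.foldl stepA (res, false, [])) = res ++ loopB ls) ∧
    (∀ (res ps : List String), ps ≠ [] →
      pvFlushA (ls.foldl stepA (res, true, ps)) =
        res ++ [PySem.Str.join " " (innerB ls ps).1] ++ loopB (innerB ls ps).2) := by
  induction n with
  | zero =>
    intro ls hls
    have : ls = [] := List.length_eq_zero_iff.mp (Nat.le_zero.mp hls)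
    subst this
    constructor
    · intro res; simp [pvFlushA, loopB]
    · intro res ps hps; simp [pvFlushA, innerB, loopB, hps]
  | succ n ih =>
    intro ls hls
    match ls with
    | [] =>
      constructor
      · intro res; simp [pvFlushA, loopB]
      · intro res ps hps; simp [pvFlushA, innerB, loopB, hps]
    | l :: rest =>
      have hr : rest.length ≤ n := Nat.le_of_succ_le_succ hls
      constructor
      · intro res
        simp only [List.foldl_cons, stepA]
        by_cases hop : pvIsOpener (PySem.Str.strip l) = true
        · simp only [hop, if_true, if_false, Bool.false_eq_true]
          rw [(ih rest hr).2 res (pvOpenParts (PySem.Str.strip l)) (pvOpenParts_ne_nil _)]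
          conv_rhs => rw [loopB]
          simp [hop]
        · simp only [hop, if_false, Bool.false_eq_true]
          rw [(ih rest hr).1 (res ++ [l])]
          conv_rhs => rw [loopB]
          simp [hop]
      · intro res ps hps
        simp only [List.foldl_cons, stepA]
        rw [innerB_cons]
        by_cases hcl : PySem.Str.isIn ")" (PySem.Str.strip l) = true
        · simp only [if_pos hcl, if_true]
          rw [(ih rest hr).1 (res ++ [PySem.Str.join " " (ps ++ [pvClosePart (PySem.Str.strip l)])])]
        · simp only [if_neg hcl]
          by_cases hpc : pvContPart (PySem.Str.strip l) ≠ ""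
          · simp only [if_pos hpc, if_true]
            rw [(ih rest hr).2 res (ps ++ [pvContPart (PySem.Str.strip l)]) (by simp)]
          · simp only [if_neg hpc, if_true, List.append_nil]
            rw [(ih rest hr).2 res ps hps]

-- ===== VERDICT (by name: the statement is the Claim_ definition above) =====
theorem join_multiline_imports_py_spec : Claim_equal_join_multiline_imports_py := by
  intro source _
  unfold Spec_join_multiline_imports_py join_multiline_imports_py join_multiline_imports_py_alt
  rw [(fold_eq_loop (PySem.Str.splitlines source).length (PySem.Str.splitlines source) le_rfl).1 []]
  simp
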